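-- pv_equiv track=rewrite | github.com/daniel-reich/ubiquitous-fiesta | HBuWYyh5YCmDKF4uH_8.py | almost_sorted
-- ===== SOURCE A (Python) =====
-- def almost_sorted(lst):
--   if lst== sorted(lst) or lst== sorted(lst)[::-1]: return False
--   for x in lst:
--     l = [i for i in lst]
--     l.remove(x)
--     if l== sorted(l) or l== sorted(l)[::-1]:
--       return True
--   return False
-- ===== SOURCE B (Python) =====
-- def almost_sorted(lst):
--     n = len(lst)
--     # p_up / p_dn: first index i (1<=i<n) where the nondecreasing / nonincreasing
--     # prefix breaks, else n.  s_up / s_dn: last such break index, else 0.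
--     p_up = n
--     for i in range(1, n):
--         if lst[i-1] > lst[i]:
--             p_up = i
--             break
--     p_dn = n
--     for i in range(1, n):
--         if lst[i-1] < lst[i]:
--             p_dn = i
--             break
--     if p_up == n or p_dn == n:
--         return False
--     s_up = 0
--     for i in range(n-1, 0, -1):
--         if lst[i-1] > lst[i]:
--             s_up = i
--             break
--     s_dn = 0
--     for i in range(n-1, 0, -1):
--         if lst[i-1] < lst[i]:
--             s_dn = i
--             break
--     for i in range(n):
--         gap_up = i == 0 or i == n-1 or lst[i-1] <= lst[i+1]
--         gap_dn = i == 0 or i == n-1 or lst[i-1] >= lst[i+1]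
--         if (i <= p_up and s_up <= i+1 and gap_up) or \
--            (i <= p_dn and s_dn <= i+1 and gap_dn):
--             return True
--     return False
-- ===== Notes on version B (the rewrite author's own statement) =====
-- stated objective: faster
-- what changed: Replaces the try-every-removal-and-sort scan with one pass computing first/last monotonicity-break indices so each candidate removal is tested in O(1), and tests every position instead of only first occurrences of each value.
-- intended difference: On lists that become monotone only by deleting a later duplicate occurrence (e.g. [0,1,2,0]) A returns False because l.remove(x) always deletes the first occurrence of x, while B returns True, the intended answer to 'can removing one element make the list (reverse-)sorted'. — e.g. on almost_sorted([0, 1, 2, 0]): A returns false, B returns true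
import Mathlib
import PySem

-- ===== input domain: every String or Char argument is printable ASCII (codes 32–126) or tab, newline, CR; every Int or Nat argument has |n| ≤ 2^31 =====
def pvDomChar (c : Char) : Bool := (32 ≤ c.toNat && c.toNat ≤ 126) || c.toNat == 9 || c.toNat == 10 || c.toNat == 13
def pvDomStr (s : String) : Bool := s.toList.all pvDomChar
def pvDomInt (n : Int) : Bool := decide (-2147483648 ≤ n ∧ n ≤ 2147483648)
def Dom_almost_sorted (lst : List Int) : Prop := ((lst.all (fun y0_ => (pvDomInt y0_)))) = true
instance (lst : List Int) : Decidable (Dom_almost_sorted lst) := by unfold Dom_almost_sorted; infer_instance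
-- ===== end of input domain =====

-- B replaces A's try-every-removal-and-sort scan (O(n^2 log n)) by one O(n) pass over
-- break indices, testing each candidate removal in O(1); B also tests every position,
-- not only first occurrences of each value (see D_almost_sorted below).

-- ===== PORT A =====
-- for x in lst: l = lst copy; l.remove(x); test l == sorted(l) or l == sorted(l)[::-1]
def pvALoop (lst : List Int) : List Int → Bool
  | [] => false
  | x :: rest =>
    match PySem.List.remove? lst x with
    | none => false   -- Python ValueError; unreachable since x ∈ lst
    | some l =>
      if l = PySem.List.sorted l (fun y => y) ∨
         l = (PySem.List.slice? (PySem.List.sorted l (fun y => y)) none none (-1)).getD []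
      then true else pvALoop lst rest

def almost_sorted (lst : List Int) : Bool :=
  if lst = PySem.List.sorted lst (fun y => y) ∨
     lst = (PySem.List.slice? (PySem.List.sorted lst (fun y => y)) none none (-1)).getD []
  then false
  else pvALoop lst lst

-- ===== PORT B =====
-- 'for i in range(...): if bad(lst[i-1], lst[i]): r = i; break' with default dflt
def pvFindBreak (lst : List Int) (bad : Int → Int → Bool) (dflt : Int) : List Int → Int
  | [] => dflt
  | i :: rest =>
    if bad (PySem.List.pyGetD lst (i - 1) 0) (PySem.List.pyGetD lst i 0) then i
    else pvFindBreak lst bad dflt rest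

-- body of B's final loop: can position i be removed leaving a monotone list?
def pvCond (lst : List Int) (n pUp pDn sUp sDn i : Int) : Bool :=
  let gapUp : Bool := i == 0 || i == n - 1 ||
      decide (PySem.List.pyGetD lst (i - 1) 0 ≤ PySem.List.pyGetD lst (i + 1) 0)
  let gapDn : Bool := i == 0 || i == n - 1 ||
      decide (PySem.List.pyGetD lst (i + 1) 0 ≤ PySem.List.pyGetD lst (i - 1) 0)
  (decide (i ≤ pUp) && decide (sUp ≤ i + 1) && gapUp) ||
  (decide (i ≤ pDn) && decide (sDn ≤ i + 1) && gapDn)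

def pvBLoop (lst : List Int) (n pUp pDn sUp sDn : Int) : List Int → Bool
  | [] => false
  | i :: rest =>
    if pvCond lst n pUp pDn sUp sDn i then true
    else pvBLoop lst n pUp pDn sUp sDn rest

def almost_sorted_alt (lst : List Int) : Bool :=
  let n : Int := lst.length
  let pUp := pvFindBreak lst (fun a b => decide (b < a)) n (PySem.List.pyRange 1 n)
  let pDn := pvFindBreak lst (fun a b => decide (a < b)) n (PySem.List.pyRange 1 n)
  if pUp = n ∨ pDn = n then false
  else
    let sUp := pvFindBreak lst (fun a b => decide (b < a)) 0 (PySem.List.pyRange (n - 1) 0 (-1))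
    let sDn := pvFindBreak lst (fun a b => decide (a < b)) 0 (PySem.List.pyRange (n - 1) 0 (-1))
    pvBLoop lst n pUp pDn sUp sDn (PySem.List.pyRange 0 n)

-- ===== PRECONDITION & SPEC =====
-- 'lst is monotone': nondecreasing or nonincreasing
def pvMono (l : List Int) : Prop :=
  List.IsChain (· ≤ ·) l ∨ List.IsChain (fun a b : Int => b ≤ a) l


-- On lists that become monotone only by deleting a later duplicate occurrence
-- (no deletion of a FIRST occurrence of a value works), A returns False because
-- l.remove(x) always deletes the first occurrence of x; B returns True, the intended
-- answer to "can removing one element make the list (reverse-)sorted".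
def D_almost_sorted (lst : List Int) : Prop :=
  (∃ i ∈ List.range lst.length, pvMono (lst.eraseIdx i)) ∧
  (∀ x ∈ lst, ¬ pvMono (lst.erase x))
instance (lst : List Int) : Decidable (D_almost_sorted lst) := by
  unfold D_almost_sorted pvMono; infer_instance

def Spec_almost_sorted (lst : List Int) (out : Bool) : Prop :=
  ¬ D_almost_sorted lst → out = almost_sorted_alt lst
instance (lst : List Int) (out : Bool) : Decidable (Spec_almost_sorted lst out) := by
  unfold Spec_almost_sorted; infer_instance

def pvDiffWitness_almost_sorted : List Int := [0, 1, 2, 0]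
def pvDiffWitnessOut_almost_sorted : Bool × Bool := (false, true)

-- ===== CLAIM (what is proved, stated in full; the proofs are below) =====
def Claim_unchanged_almost_sorted : Prop :=
  ∀ (lst : List Int), Dom_almost_sorted lst → Spec_almost_sorted lst (almost_sorted lst)
def Claim_changed_almost_sorted : Prop :=
  Dom_almost_sorted (pvDiffWitness_almost_sorted) ∧
  D_almost_sorted (pvDiffWitness_almost_sorted) ∧
  almost_sorted (pvDiffWitness_almost_sorted) = pvDiffWitnessOut_almost_sorted.1 ∧
  almost_sorted_alt (pvDiffWitness_almost_sorted) = pvDiffWitnessOut_almost_sorted.2 ∧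
  pvDiffWitnessOut_almost_sorted.1 ≠ pvDiffWitnessOut_almost_sorted.2
def Claim_exact_almost_sorted : Prop :=
  ∀ (lst : List Int), Dom_almost_sorted lst → D_almost_sorted lst →
    almost_sorted lst ≠ almost_sorted_alt lst

-- ===== LEMMAS AND PROOFS =====

-- A's sortedness test: l == sorted(l) iff l is a nondecreasing chain
theorem pv_sorted_eq_iff (l : List Int) :
    l = PySem.List.sorted l (fun y => y) ↔ List.IsChain (· ≤ ·) l := by
  constructor
  · intro h
    rw [h]
    exact (PySem.List.sorted_pairwise l (fun y => y)).isChain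
  · intro h
    exact (PySem.List.sorted_eq_self_of_pairwise l (fun y => y) h.pairwise).symm

-- A's reverse-sortedness test: l == sorted(l)[::-1] iff l is a nonincreasing chain
theorem pv_rev_eq_iff (l : List Int) :
    l = (PySem.List.slice? (PySem.List.sorted l (fun y => y)) none none (-1)).getD [] ↔
      List.IsChain (fun a b : Int => b ≤ a) l := by
  rw [PySem.List.slice?_none_none_neg_one, Option.getD_some]
  constructor
  · intro h
    rw [h]
    rw [List.isChain_reverse]
    exact (PySem.List.sorted_pairwise l (fun y => y)).isChain
  · intro h
    have hrev : List.IsChain (· ≤ ·) l.reverse := by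
      rw [List.isChain_reverse]; exact h
    have := PySem.List.sorted_id_eq_of_perm_of_pairwise l l.reverse
      (List.reverse_perm l) hrev.pairwise
    rw [show (PySem.List.sorted l fun y => y) = (PySem.List.sorted l fun x => x) from rfl, this,
      List.reverse_reverse]

-- A's monotonicity test, combined
theorem pv_monotest_iff (l : List Int) :
    (l = PySem.List.sorted l (fun y => y) ∨
     l = (PySem.List.slice? (PySem.List.sorted l (fun y => y)) none none (-1)).getD []) ↔
      pvMono l := by
  unfold pvMono
  exact or_congr (pv_sorted_eq_iff l) (pv_rev_eq_iff l)

-- A's loop: true iff some first-occurrence removal is monotone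
theorem pvALoop_iff (lst : List Int) (rest : List Int) (h : ∀ x ∈ rest, x ∈ lst) :
    pvALoop lst rest = true ↔ ∃ x ∈ rest, pvMono (lst.erase x) := by
  induction rest with
  | nil => simp [pvALoop]
  | cons x rest ih =>
    have hx : x ∈ lst := h x (List.mem_cons_self)
    have hrest : ∀ y ∈ rest, y ∈ lst := fun y hy => h y (List.mem_cons_of_mem _ hy)
    simp only [pvALoop, PySem.List.remove?_eq_some_erase lst x hx]
    by_cases hc : pvMono (lst.erase x)
    · have := (pv_monotest_iff (lst.erase x)).mpr hc
      simp only [this, if_true]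
      simp only [true_iff]
      exact ⟨x, List.mem_cons_self, hc⟩
    · have hcc : ¬(lst.erase x = PySem.List.sorted (lst.erase x) (fun y => y) ∨
        lst.erase x = (PySem.List.slice? (PySem.List.sorted (lst.erase x) (fun y => y))
          none none (-1)).getD []) := fun hh => hc ((pv_monotest_iff (lst.erase x)).mp hh)
      rw [if_neg hcc, ih hrest]
      constructor
      · rintro ⟨y, hy, hmy⟩
        exact ⟨y, List.mem_cons_of_mem _ hy, hmy⟩
      · rintro ⟨y, hy, hmy⟩
        rcases List.mem_cons.mp hy with rfl | hy'
        · exact absurd hmy hc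
        · exact ⟨y, hy', hmy⟩

-- characterization of A
theorem pvA_iff (lst : List Int) :
    almost_sorted lst = true ↔ ¬ pvMono lst ∧ ∃ x ∈ lst, pvMono (lst.erase x) := by
  unfold almost_sorted
  by_cases hm : pvMono lst
  · rw [if_pos ((pv_monotest_iff lst).mpr hm)]
    simp [hm]
  · rw [if_neg (fun hh => hm ((pv_monotest_iff lst).mp hh)),
      pvALoop_iff lst lst (fun x hx => hx)]
    simp [hm]

-- generic break-finder spec, increasing range
theorem pvFindBreak_inc (lst : List Int) (bad : Int → Int → Bool) (dflt b : Int) :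
    ∀ a : Int,
    (∃ r, pvFindBreak lst bad dflt (PySem.List.pyRange a b) = r ∧ a ≤ r ∧ r < b ∧
      bad (PySem.List.pyGetD lst (r - 1) 0) (PySem.List.pyGetD lst r 0) = true ∧
      ∀ j, a ≤ j → j < r →
        bad (PySem.List.pyGetD lst (j - 1) 0) (PySem.List.pyGetD lst j 0) = false) ∨
    (pvFindBreak lst bad dflt (PySem.List.pyRange a b) = dflt ∧
      ∀ j, a ≤ j → j < b →
        bad (PySem.List.pyGetD lst (j - 1) 0) (PySem.List.pyGetD lst j 0) = false) := by
  have H : ∀ (k : Nat) (a : Int), (b - a).toNat ≤ k →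
    (∃ r, pvFindBreak lst bad dflt (PySem.List.pyRange a b) = r ∧ a ≤ r ∧ r < b ∧
      bad (PySem.List.pyGetD lst (r - 1) 0) (PySem.List.pyGetD lst r 0) = true ∧
      ∀ j, a ≤ j → j < r →
        bad (PySem.List.pyGetD lst (j - 1) 0) (PySem.List.pyGetD lst j 0) = false) ∨
    (pvFindBreak lst bad dflt (PySem.List.pyRange a b) = dflt ∧
      ∀ j, a ≤ j → j < b →
        bad (PySem.List.pyGetD lst (j - 1) 0) (PySem.List.pyGetD lst j 0) = false) := by
    intro k
    induction k with
    | zero =>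
      intro a hk
      right
      rw [PySem.List.pyRange_one_eq_nil (by omega)]
      exact ⟨rfl, fun j h1 h2 => absurd h2 (by omega)⟩
    | succ k ih =>
      intro a hk
      by_cases hab : b ≤ a
      · right
        rw [PySem.List.pyRange_one_eq_nil hab]
        exact ⟨rfl, fun j h1 h2 => absurd h2 (by omega)⟩
      · rw [not_le] at hab
        rw [PySem.List.pyRange_one_cons hab]
        by_cases hbad : bad (PySem.List.pyGetD lst (a - 1) 0) (PySem.List.pyGetD lst a 0) = true
        · left
          exact ⟨a, by simp [pvFindBreak, hbad], le_refl a, hab, hbad,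
            fun j h1 h2 => absurd h2 (by omega)⟩
        · have hbf : bad (PySem.List.pyGetD lst (a - 1) 0) (PySem.List.pyGetD lst a 0) = false :=
            Bool.eq_false_iff.mpr hbad
          have step : pvFindBreak lst bad dflt (a :: PySem.List.pyRange (a + 1) b) =
              pvFindBreak lst bad dflt (PySem.List.pyRange (a + 1) b) := by
            simp [pvFindBreak, hbf]
          rw [step]
          rcases ih (a + 1) (by omega) with ⟨r, hr, h1, h2, h3, h4⟩ | ⟨hr, hall⟩
          · left
            refine ⟨r, hr, by omega, h2, h3, fun j hj1 hj2 => ?_⟩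
            by_cases hja : j = a
            · subst hja; exact hbf
            · exact h4 j (by omega) hj2
          · right
            refine ⟨hr, fun j hj1 hj2 => ?_⟩
            by_cases hja : j = a
            · subst hja; exact hbf
            · exact hall j (by omega) hj2
  exact fun a => H (b - a).toNat a le_rfl

-- generic break-finder spec, decreasing range
theorem pvFindBreak_dec (lst : List Int) (bad : Int → Int → Bool) (dflt b : Int) :
    ∀ a : Int,
    (∃ r, pvFindBreak lst bad dflt (PySem.List.pyRange a b (-1)) = r ∧ b < r ∧ r ≤ a ∧
      bad (PySem.List.pyGetD lst (r - 1) 0) (PySem.List.pyGetD lst r 0) = true ∧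
      ∀ j, r < j → j ≤ a →
        bad (PySem.List.pyGetD lst (j - 1) 0) (PySem.List.pyGetD lst j 0) = false) ∨
    (pvFindBreak lst bad dflt (PySem.List.pyRange a b (-1)) = dflt ∧
      ∀ j, b < j → j ≤ a →
        bad (PySem.List.pyGetD lst (j - 1) 0) (PySem.List.pyGetD lst j 0) = false) := by
  have H : ∀ (k : Nat) (a : Int), (a - b).toNat ≤ k →
    (∃ r, pvFindBreak lst bad dflt (PySem.List.pyRange a b (-1)) = r ∧ b < r ∧ r ≤ a ∧
      bad (PySem.List.pyGetD lst (r - 1) 0) (PySem.List.pyGetD lst r 0) = true ∧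
      ∀ j, r < j → j ≤ a →
        bad (PySem.List.pyGetD lst (j - 1) 0) (PySem.List.pyGetD lst j 0) = false) ∨
    (pvFindBreak lst bad dflt (PySem.List.pyRange a b (-1)) = dflt ∧
      ∀ j, b < j → j ≤ a →
        bad (PySem.List.pyGetD lst (j - 1) 0) (PySem.List.pyGetD lst j 0) = false) := by
    intro k
    induction k with
    | zero =>
      intro a hk
      right
      rw [PySem.List.pyRange_neg_one_eq_nil (by omega)]
      exact ⟨rfl, fun j h1 h2 => absurd h1 (by omega)⟩
    | succ k ih =>
      intro a hk
      by_cases hab : a ≤ b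
      · right
        rw [PySem.List.pyRange_neg_one_eq_nil hab]
        exact ⟨rfl, fun j h1 h2 => absurd h1 (by omega)⟩
      · rw [not_le] at hab
        rw [PySem.List.pyRange_neg_one_cons hab]
        by_cases hbad : bad (PySem.List.pyGetD lst (a - 1) 0) (PySem.List.pyGetD lst a 0) = true
        · left
          exact ⟨a, by simp [pvFindBreak, hbad], hab, le_refl a, hbad,
            fun j h1 h2 => absurd h1 (by omega)⟩
        · have hbf : bad (PySem.List.pyGetD lst (a - 1) 0) (PySem.List.pyGetD lst a 0) = false :=
            Bool.eq_false_iff.mpr hbad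
          have step : pvFindBreak lst bad dflt (a :: PySem.List.pyRange (a - 1) b (-1)) =
              pvFindBreak lst bad dflt (PySem.List.pyRange (a - 1) b (-1)) := by
            simp [pvFindBreak, hbf]
          rw [step]
          rcases ih (a - 1) (by omega) with ⟨r, hr, h1, h2, h3, h4⟩ | ⟨hr, hall⟩
          · left
            refine ⟨r, hr, h1, by omega, h3, fun j hj1 hj2 => ?_⟩
            by_cases hja : j = a
            · subst hja; exact hbf
            · exact h4 j hj1 (by omega)
          · right
            refine ⟨hr, fun j hj1 hj2 => ?_⟩
            by_cases hja : j = a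
            · subst hja; exact hbf
            · exact hall j hj1 (by omega)
  exact fun a => H (a - b).toNat a le_rfl

-- B's loop: true iff some index satisfies the O(1) test
theorem pvBLoop_iff (lst : List Int) (n pUp pDn sUp sDn : Int) (idxs : List Int) :
    pvBLoop lst n pUp pDn sUp sDn idxs = true ↔
      ∃ i ∈ idxs, pvCond lst n pUp pDn sUp sDn i = true := by
  induction idxs with
  | nil => simp [pvBLoop]
  | cons i rest ih =>
    simp only [pvBLoop]
    by_cases hc : pvCond lst n pUp pDn sUp sDn i = true
    · simp [hc]
    · simp only [if_neg hc, ih]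
      constructor
      · rintro ⟨j, hj, hcj⟩
        exact ⟨j, List.mem_cons_of_mem _ hj, hcj⟩
      · rintro ⟨j, hj, hcj⟩
        rcases List.mem_cons.mp hj with rfl | hj'
        · exact absurd hcj hc
        · exact ⟨j, hj', hcj⟩

-- the "bad pair at j" bool vs the order relation on adjacent elements
theorem pv_bad_eq (lst : List Int) (R : Int → Int → Prop) [DecidableRel R]
    (bad : Int → Int → Bool) (hbad : ∀ a b, bad a b = !decide (R a b))
    (j : Int) (hj1 : 1 ≤ j) (hj2 : j < (lst.length : Int)) :
    bad (PySem.List.pyGetD lst (j - 1) 0) (PySem.List.pyGetD lst j 0) =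
      !decide (R (lst[j.toNat - 1]'(by omega)) (lst[j.toNat]'(by omega))) := by
  rw [PySem.List.pyGetD_eq_getElem lst 0 (by omega) (by omega),
    PySem.List.pyGetD_eq_getElem lst 0 (by omega) (by omega), hbad]
  simp only [show (j - 1).toNat = j.toNat - 1 from by omega]

theorem pv_pair_false (lst : List Int) (R : Int → Int → Prop) [DecidableRel R]
    (bad : Int → Int → Bool) (hbad : ∀ a b, bad a b = !decide (R a b))
    (j : Int) (hj1 : 1 ≤ j) (hj2 : j < (lst.length : Int))
    (h : bad (PySem.List.pyGetD lst (j - 1) 0) (PySem.List.pyGetD lst j 0) = false) :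
    R (lst[j.toNat - 1]'(by omega)) (lst[j.toNat]'(by omega)) := by
  rw [pv_bad_eq lst R bad hbad j hj1 hj2] at h
  simpa using h

theorem pv_pair_true (lst : List Int) (R : Int → Int → Prop) [DecidableRel R]
    (bad : Int → Int → Bool) (hbad : ∀ a b, bad a b = !decide (R a b))
    (j : Int) (hj1 : 1 ≤ j) (hj2 : j < (lst.length : Int))
    (h : bad (PySem.List.pyGetD lst (j - 1) 0) (PySem.List.pyGetD lst j 0) = true) :
    ¬ R (lst[j.toNat - 1]'(by omega)) (lst[j.toNat]'(by omega)) := by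
  rw [pv_bad_eq lst R bad hbad j hj1 hj2] at h
  simpa using h

-- chains of take/drop via adjacent pairs
theorem pv_take_chain (lst : List Int) (R : Int → Int → Prop) (k : Nat)
    (hk : k ≤ lst.length) :
    List.IsChain R (lst.take k) ↔
      ∀ j : Nat, (hj : j + 1 < k) → R (lst[j]'(by omega)) (lst[j + 1]'(by omega)) := by
  rw [List.isChain_iff_getElem]
  have hlen : (lst.take k).length = k := by rw [List.length_take]; omega
  constructor
  · intro H j hj
    have := H j (by omega)
    simpa [List.getElem_take] using this
  · intro H i hi
    rw [hlen] at hi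
    simpa [List.getElem_take] using H i hi

theorem pv_drop_chain (lst : List Int) (R : Int → Int → Prop) (k : Nat) :
    List.IsChain R (lst.drop k) ↔
      ∀ j : Nat, k ≤ j → (hj : j + 1 < lst.length) →
        R (lst[j]'(by omega)) (lst[j + 1]'(by omega)) := by
  rw [List.isChain_iff_getElem]
  constructor
  · intro H j hkj hj
    obtain ⟨t, rfl⟩ : ∃ t, j = k + t := ⟨j - k, by omega⟩
    have := H t (by simp [List.length_drop]; omega)
    simpa [List.getElem_drop, show k + t + 1 = k + (t + 1) from by omega] using this
  · intro H i hi
    simp only [List.length_drop] at hi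
    have := H (k + i) (by omega) (by omega)
    simpa [List.getElem_drop, show k + i + 1 = k + (i + 1) from by omega] using this

-- removing index i leaves an R-chain iff prefix chain + suffix chain + gap
theorem pv_erase_chain (lst : List Int) (R : Int → Int → Prop)
    (i : Nat) (hi : i < lst.length) :
    List.IsChain R (lst.eraseIdx i) ↔
      (List.IsChain R (lst.take i) ∧ List.IsChain R (lst.drop (i + 1)) ∧
        ∀ (h1 : 1 ≤ i) (h2 : i + 1 < lst.length),
          R (lst[i - 1]'(by omega)) (lst[i + 1]'(by omega))) := by
  rw [List.eraseIdx_eq_take_drop_succ, List.isChain_append]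
  refine and_congr_right fun _ => and_congr_right fun _ => ?_
  constructor
  · intro h h1 h2
    refine h (lst[i - 1]'(by omega)) ?_ (lst[i + 1]'(by omega)) ?_
    · rw [List.getLast?_take, if_neg (by omega : ¬ i = 0),
        List.getElem?_eq_getElem (show i - 1 < lst.length by omega)]
      simp
    · rw [List.head?_drop, List.getElem?_eq_getElem h2]
      simp
  · intro hg x hx y hy
    by_cases h0 : i = 0
    · subst h0
      rw [List.getLast?_take] at hx
      simp at hx
    · by_cases hn : i + 1 < lst.length
      · rw [List.getLast?_take, if_neg h0,
          List.getElem?_eq_getElem (show i - 1 < lst.length by omega)] at hx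
        simp only [Option.some_or, Option.mem_def, Option.some.injEq] at hx
        rw [List.head?_drop, List.getElem?_eq_getElem hn] at hy
        simp only [Option.mem_def, Option.some.injEq] at hy
        subst hx; subst hy
        exact hg (by omega) hn
      · rw [List.head?_drop, List.getElem?_eq_none (by omega)] at hy
        simp at hy

-- i ≤ pUp iff the prefix of length i is an R-chain
theorem pv_pUp_iff (lst : List Int) (R : Int → Int → Prop) [DecidableRel R]
    (bad : Int → Int → Bool) (hbad : ∀ a b, bad a b = !decide (R a b))
    (i : Nat) (hi : i ≤ lst.length) :
    ((i : Int) ≤ pvFindBreak lst bad (lst.length : Int)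
        (PySem.List.pyRange 1 (lst.length : Int)) ↔
      List.IsChain R (lst.take i)) := by
  rw [pv_take_chain lst R i hi]
  rcases pvFindBreak_inc lst bad (lst.length : Int) (lst.length : Int) 1 with
    ⟨r, hr, h1, h2, h3, h4⟩ | ⟨hr, hall⟩
  · rw [hr]
    constructor
    · intro hle t ht
      have hp := pv_pair_false lst R bad hbad ((t + 1 : Nat) : Int) (by omega) (by omega)
        (h4 _ (by omega) (by omega))
      simpa using hp
    · intro hch
      by_contra hlt
      rw [not_le] at hlt
      have hnp := pv_pair_true lst R bad hbad r h1 (by omega) h3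
      have := hch (r.toNat - 1) (by omega)
      simp only [show r.toNat - 1 + 1 = r.toNat from by omega] at this
      exact hnp this
  · rw [hr]
    constructor
    · intro _ t ht
      have hp := pv_pair_false lst R bad hbad ((t + 1 : Nat) : Int) (by omega) (by omega)
        (hall _ (by omega) (by omega))
      simpa using hp
    · intro _
      omega

-- sUp ≤ i iff the suffix from i is an R-chain
theorem pv_sUp_iff (lst : List Int) (R : Int → Int → Prop) [DecidableRel R]
    (bad : Int → Int → Bool) (hbad : ∀ a b, bad a b = !decide (R a b)) (i : Nat) :
    (pvFindBreak lst bad 0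
        (PySem.List.pyRange ((lst.length : Int) - 1) 0 (-1)) ≤ (i : Int) ↔
      List.IsChain R (lst.drop i)) := by
  rw [pv_drop_chain lst R i]
  rcases pvFindBreak_dec lst bad 0 0 ((lst.length : Int) - 1) with
    ⟨r, hr, h1, h2, h3, h4⟩ | ⟨hr, hall⟩
  · rw [hr]
    constructor
    · intro hle t hit ht
      have hp := pv_pair_false lst R bad hbad ((t + 1 : Nat) : Int) (by omega) (by omega)
        (h4 _ (by omega) (by omega))
      simpa using hp
    · intro hch
      by_contra hlt
      rw [not_le] at hlt
      have hnp := pv_pair_true lst R bad hbad r h1 (by omega) h3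
      have := hch (r.toNat - 1) (by omega) (by omega)
      simp only [show r.toNat - 1 + 1 = r.toNat from by omega] at this
      exact hnp this
  · rw [hr]
    constructor
    · intro _ t hit ht
      have hp := pv_pair_false lst R bad hbad ((t + 1 : Nat) : Int) (by omega) (by omega)
        (hall _ (by omega) (by omega))
      simpa using hp
    · intro _
      omega

-- upper bound of the prefix break finder
theorem pv_pUp_le (lst : List Int) (bad : Int → Int → Bool) :
    pvFindBreak lst bad (lst.length : Int) (PySem.List.pyRange 1 (lst.length : Int)) ≤
      (lst.length : Int) := by
  rcases pvFindBreak_inc lst bad (lst.length : Int) (lst.length : Int) 1 with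
    ⟨r, hr, h1, h2, h3, h4⟩ | ⟨hr, hall⟩
  · rw [hr]; omega
  · rw [hr]

-- pUp = n iff the whole list is an R-chain
theorem pv_pUp_n_iff (lst : List Int) (R : Int → Int → Prop) [DecidableRel R]
    (bad : Int → Int → Bool) (hbad : ∀ a b, bad a b = !decide (R a b)) :
    (pvFindBreak lst bad (lst.length : Int)
        (PySem.List.pyRange 1 (lst.length : Int)) = (lst.length : Int) ↔
      List.IsChain R lst) := by
  have h := pv_pUp_iff lst R bad hbad lst.length le_rfl
  rw [List.take_length] at h
  constructor
  · intro he
    exact h.mp (by omega)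
  · intro hc
    have := h.mpr hc
    have hle := pv_pUp_le lst bad
    omega

-- the gap test of B's loop body
theorem pv_gap_iff (lst : List Int) (R : Int → Int → Prop) [DecidableRel R]
    (g : Int → Int → Bool) (hg : ∀ a b, g a b = decide (R a b))
    (i : Nat) (hi : i < lst.length) :
    ((((i : Nat) : Int) == 0 || ((i : Nat) : Int) == (lst.length : Int) - 1 ||
      g (PySem.List.pyGetD lst (((i : Nat) : Int) - 1) 0)
        (PySem.List.pyGetD lst (((i : Nat) : Int) + 1) 0)) = true ↔
      ∀ (h1 : 1 ≤ i) (h2 : i + 1 < lst.length),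
        R (lst[i - 1]'(by omega)) (lst[i + 1]'(by omega))) := by
  by_cases h0 : i = 0
  · subst h0
    simp only [Nat.cast_zero, BEq.rfl, Bool.true_or]
    constructor
    · intro _ h1 h2; omega
    · intro _; trivial
  · by_cases hlast : i + 1 = lst.length
    · have : ((i : Nat) : Int) == (lst.length : Int) - 1 := by
        simp only [beq_iff_eq]; omega
      simp only [this, Bool.or_true, Bool.true_or]
      constructor
      · intro _ h1 h2; omega
      · intro _; trivial
    · have hb0 : (((i : Nat) : Int) == 0) = false := by
        simp only [beq_eq_false_iff_ne, ne_eq]; omega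
      have hbn : (((i : Nat) : Int) == (lst.length : Int) - 1) = false := by
        simp only [beq_eq_false_iff_ne, ne_eq]; omega
      rw [hb0, hbn]
      simp only [Bool.false_or]
      rw [PySem.List.pyGetD_eq_getElem lst 0 (by omega) (by omega),
        PySem.List.pyGetD_eq_getElem lst 0 (by omega) (by omega), hg]
      simp only [decide_eq_true_eq,
        show (((i : Nat) : Int) - 1).toNat = i - 1 from by omega,
        show (((i : Nat) : Int) + 1).toNat = i + 1 from by omega]
      constructor
      · intro h _ _; exact h
      · intro h; exact h (by omega) (by omega)

-- one half (up or down) of B's O(1) removal test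
theorem pv_part_iff (lst : List Int) (R : Int → Int → Prop) [DecidableRel R]
    (bad : Int → Int → Bool) (hbad : ∀ a b, bad a b = !decide (R a b))
    (gap : Bool) (i : Nat) (hi : i < lst.length)
    (hgap : gap = true ↔ ∀ (h1 : 1 ≤ i) (h2 : i + 1 < lst.length),
      R (lst[i - 1]'(by omega)) (lst[i + 1]'(by omega))) :
    ((decide (((i : Nat) : Int) ≤ pvFindBreak lst bad (lst.length : Int)
        (PySem.List.pyRange 1 (lst.length : Int))) &&
      decide (pvFindBreak lst bad 0
        (PySem.List.pyRange ((lst.length : Int) - 1) 0 (-1)) ≤ ((i : Nat) : Int) + 1) &&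
      gap) = true ↔ List.IsChain R (lst.eraseIdx i)) := by
  rw [pv_erase_chain lst R i hi]
  simp only [Bool.and_eq_true, decide_eq_true_eq]
  rw [and_assoc]
  refine and_congr (pv_pUp_iff lst R bad hbad i (le_of_lt hi)) (and_congr ?_ hgap)
  rw [show ((i : Nat) : Int) + 1 = (((i + 1 : Nat)) : Int) from by omega]
  exact pv_sUp_iff lst R bad hbad (i + 1)

-- characterization of B
theorem pvB_iff (lst : List Int) :
    almost_sorted_alt lst = true ↔
      ¬ pvMono lst ∧ ∃ i ∈ List.range lst.length, pvMono (lst.eraseIdx i) := by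
  have hbU : ∀ a b : Int, (fun a b : Int => decide (b < a)) a b = !decide (a ≤ b) := by
    intro a b
    by_cases h : a ≤ b
    · simp [h, not_lt.mpr h]
    · simp [h, not_le.mp h]
  have hbD : ∀ a b : Int,
      (fun a b : Int => decide (a < b)) a b = !decide ((fun x y : Int => y ≤ x) a b) := by
    intro a b
    by_cases h : b ≤ a
    · simp [h, not_lt.mpr h]
    · simp [h, not_le.mp h]
  simp only [almost_sorted_alt]
  by_cases hm : pvMono lst
  · rw [if_pos ?side]
    case side =>
      rcases hm with h | h
      · exact Or.inl ((pv_pUp_n_iff lst _ _ hbU).mpr h)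
      · exact Or.inr ((pv_pUp_n_iff lst _ _ hbD).mpr h)
    simp [hm]
  · rw [if_neg ?side]
    case side =>
      rintro (h | h)
      · exact hm (Or.inl ((pv_pUp_n_iff lst _ _ hbU).mp h))
      · exact hm (Or.inr ((pv_pUp_n_iff lst _ _ hbD).mp h))
    rw [pvBLoop_iff]
    have key : ∀ i : Nat, i < lst.length →
        (pvCond lst (lst.length : Int)
          (pvFindBreak lst (fun a b => decide (b < a)) (lst.length : Int)
            (PySem.List.pyRange 1 (lst.length : Int)))
          (pvFindBreak lst (fun a b => decide (a < b)) (lst.length : Int)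
            (PySem.List.pyRange 1 (lst.length : Int)))
          (pvFindBreak lst (fun a b => decide (b < a)) 0
            (PySem.List.pyRange ((lst.length : Int) - 1) 0 (-1)))
          (pvFindBreak lst (fun a b => decide (a < b)) 0
            (PySem.List.pyRange ((lst.length : Int) - 1) 0 (-1)))
          ((i : Nat) : Int) = true ↔ pvMono (lst.eraseIdx i)) := by
      intro i hi
      unfold pvCond pvMono
      simp only [Bool.or_eq_true]
      refine or_congr ?_ ?_
      · exact pv_part_iff lst _ _ hbU _ i hi
          (pv_gap_iff lst (· ≤ ·) (fun a b => decide (a ≤ b)) (fun a b => rfl) i hi)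
      · exact pv_part_iff lst _ _ hbD _ i hi
          (pv_gap_iff lst (fun x y : Int => y ≤ x) (fun a b => decide (b ≤ a))
            (fun a b => rfl) i hi)
    constructor
    · rintro ⟨j, hj, hcj⟩
      have hb := PySem.List.mem_pyRange_one.mp hj
      refine ⟨hm, j.toNat, List.mem_range.mpr (by omega), ?_⟩
      have := key j.toNat (by omega)
      rw [show ((j.toNat : Nat) : Int) = j from by omega] at this
      exact this.mp hcj
    · rintro ⟨-, i, hi, hmono⟩
      have hi' := List.mem_range.mp hi
      exact ⟨((i : Nat) : Int), PySem.List.mem_pyRange_one.mpr ⟨by omega, by omega⟩,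
        (key i hi').mpr hmono⟩

-- first-occurrence removals are index removals
theorem pv_erase_exists (lst : List Int) :
    (∃ x ∈ lst, pvMono (lst.erase x)) →
      ∃ i ∈ List.range lst.length, pvMono (lst.eraseIdx i) := by
  rintro ⟨x, hx, hm⟩
  refine ⟨lst.idxOf x, List.mem_range.mpr (List.idxOf_lt_length_of_mem hx), ?_⟩
  rwa [List.erase_eq_eraseIdx_of_idxOf rfl] at hm

-- a monotone list stays monotone when its head is dropped
theorem pv_mono_tail (x : Int) (t : List Int) (h : pvMono (x :: t)) : pvMono t := by
  rcases h with h | h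
  · exact Or.inl h.tail
  · exact Or.inr h.tail

-- ===== VERDICT (by name: the statement is the Claim_ definition above) =====
theorem almost_sorted_spec : Claim_unchanged_almost_sorted := by
  intro lst _ hnD
  by_cases hm : pvMono lst
  · have hA : almost_sorted lst = false := by
      cases h : almost_sorted lst
      · rfl
      · exact absurd hm ((pvA_iff lst).mp h).1
    have hB : almost_sorted_alt lst = false := by
      cases h : almost_sorted_alt lst
      · rfl
      · exact absurd hm ((pvB_iff lst).mp h).1
    rw [hA, hB]
  · cases hA : almost_sorted lst <;> cases hB : almost_sorted_alt lst <;> try rfl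
    · exfalso
      obtain ⟨-, hex⟩ := (pvB_iff lst).mp hB
      have hx : ∃ x ∈ lst, pvMono (lst.erase x) := by
        by_contra hno
        simp only [not_exists, not_and] at hno
        exact hnD ⟨hex, hno⟩
      have : almost_sorted lst = true := (pvA_iff lst).mpr ⟨hm, hx⟩
      rw [hA] at this
      exact Bool.false_ne_true this
    · exfalso
      obtain ⟨-, x, hx, hmx⟩ := (pvA_iff lst).mp hA
      have : almost_sorted_alt lst = true :=
        (pvB_iff lst).mpr ⟨hm, pv_erase_exists lst ⟨x, hx, hmx⟩⟩
      rw [hB] at this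
      exact Bool.false_ne_true this

theorem almost_sorted_changed : Claim_changed_almost_sorted := by
  unfold Claim_changed_almost_sorted; decide

theorem almost_sorted_tight : Claim_exact_almost_sorted := by
  intro lst _ hD
  obtain ⟨⟨i, hi, hmono⟩, hall⟩ := hD
  have hi' := List.mem_range.mp hi
  have hne : lst ≠ [] := by
    intro h; rw [h] at hi'; simp at hi'
  have hnm : ¬ pvMono lst := by
    intro hmn
    cases lst with
    | nil => exact hne rfl
    | cons x t =>
      have := hall x (List.mem_cons_self)
      rw [List.erase_cons_head] at this
      exact this (pv_mono_tail x t hmn)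
  have hA : almost_sorted lst = false := by
    cases h : almost_sorted lst
    · rfl
    · obtain ⟨-, x, hx, hmx⟩ := (pvA_iff lst).mp h
      exact absurd hmx (hall x hx)
  have hB : almost_sorted_alt lst = true := (pvB_iff lst).mpr ⟨hnm, i, hi, hmono⟩
  rw [hA, hB]
  exact Bool.false_ne_true
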